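-- pv_equiv track=rewrite | github.com/ptk3917/work_n_project | picking/picking_pipeline_florence2.py | _parse_target
-- ===== SOURCE A (Python) =====
-- SIZE_WORDS = {
--     "biggest": "max", "largest": "max", "big": "max", "large": "max",
--     "smallest": "min", "small": "min", "little": "min", "tiny": "min",
-- }
--
-- COLOR_WORDS = {
--     "red", "blue", "green", "yellow", "black", "white", "orange",
--     "pink", "purple", "brown", "gray", "grey", "silver",
-- }
--
-- POSITION_WORDS = {
--     "left": "left", "right": "right", "leftmost": "left", "rightmost": "right",
--     "front": "front", "back": "back", "near": "front", "far": "back",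
-- }
--
-- def _parse_target(target: str):
--     """
--     타겟 문자열에서 기본 물체명 / 크기 / 색상 / 위치 수식어를 분리.
--     예) "the biggest red box" → base="box", size="max", color="red", pos=None
--         "black cap bottle"   → base="bottle", size=None, color="black", pos=None
--     """
--     words = target.lower().split()
--     size_mod  = None
--     color_mod = None
--     pos_mod   = None
--     base_words = []
--
--     for w in words:
--         if w in SIZE_WORDS:
--             size_mod = SIZE_WORDS[w]
--         elif w in COLOR_WORDS:
--             color_mod = w
--         elif w in POSITION_WORDS:
--             pos_mod = POSITION_WORDS[w]
--         elif w in ("the", "a", "an", "of", "or", "my", "that", "this"):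
--             continue  # 관사/전치사 제거
--         else:
--             base_words.append(w)
--
--     base = " ".join(base_words) if base_words else target.lower()
--     return base, size_mod, color_mod, pos_mod
-- ===== SOURCE B (Python) =====
-- SIZE_WORDS = {
--     "biggest": "max", "largest": "max", "big": "max", "large": "max",
--     "smallest": "min", "small": "min", "little": "min", "tiny": "min",
-- }
--
-- COLOR_WORDS = {
--     "red", "blue", "green", "yellow", "black", "white", "orange",
--     "pink", "purple", "brown", "gray", "grey", "silver",
-- }
--
-- POSITION_WORDS = {
--     "left": "left", "right": "right", "leftmost": "left", "rightmost": "right",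
--     "front": "front", "back": "back", "near": "front", "far": "back",
-- }
--
-- STOP_WORDS = {"the", "a", "an", "of", "or", "my", "that", "this"}
--
--
-- def _parse_target(target: str):
--     words = target.lower().split()
--     sizes = [SIZE_WORDS[w] for w in words if w in SIZE_WORDS]
--     colors = [w for w in words if w in COLOR_WORDS]
--     positions = [POSITION_WORDS[w] for w in words if w in POSITION_WORDS]
--     base_words = [w for w in words
--                   if w not in SIZE_WORDS and w not in COLOR_WORDS
--                   and w not in POSITION_WORDS and w not in STOP_WORDS]
--     base = " ".join(base_words) if base_words else target.lower()
--     return (base,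
--             sizes[-1] if sizes else None,
--             colors[-1] if colors else None,
--             positions[-1] if positions else None)
-- ===== Notes on version B (the rewrite author's own statement) =====
-- stated objective: alternative
-- what changed: Replaces the single stateful priority-branch loop with independent filtered passes per category (last match wins via [-1]) plus one filter for the base words, removing the mutable accumulator state.
import Mathlib
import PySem

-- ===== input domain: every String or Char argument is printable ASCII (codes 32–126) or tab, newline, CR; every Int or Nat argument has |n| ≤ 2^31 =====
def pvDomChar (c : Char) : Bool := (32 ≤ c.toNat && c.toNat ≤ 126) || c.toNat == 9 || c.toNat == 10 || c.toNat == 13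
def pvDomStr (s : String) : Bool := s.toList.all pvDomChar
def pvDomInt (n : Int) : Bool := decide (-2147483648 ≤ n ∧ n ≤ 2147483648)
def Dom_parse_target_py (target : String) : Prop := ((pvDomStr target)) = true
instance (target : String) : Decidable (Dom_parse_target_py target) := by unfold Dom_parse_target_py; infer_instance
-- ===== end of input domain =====

-- B replaces A's single stateful priority-branch loop by independent last-match passes per category; objective: alternative decomposition (same cost).

-- shared module-level constants (the Python tables)
def pvSizeWords : PySem.Dict String String := PySem.Dict.mk
  [("biggest","max"), ("largest","max"), ("big","max"), ("large","max"),
   ("smallest","min"), ("small","min"), ("little","min"), ("tiny","min")]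
def pvColorWords : List String :=
  ["red","blue","green","yellow","black","white","orange",
   "pink","purple","brown","gray","grey","silver"]
def pvPosWords : PySem.Dict String String := PySem.Dict.mk
  [("left","left"), ("right","right"), ("leftmost","left"), ("rightmost","right"),
   ("front","front"), ("back","back"), ("near","front"), ("far","back")]
def pvStopWords : List String := ["the","a","an","of","or","my","that","this"]

-- ===== PORT A =====
-- one step of A's for-loop over (size_mod, color_mod, pos_mod, base_words)
def parseStepA (st : Option String × Option String × Option String × List String) (w : String) :
    Option String × Option String × Option String × List String :=
  let (s, c, p, b) := st
  if pvSizeWords.contains w then (pvSizeWords.get? w, c, p, b)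
  else if pvColorWords.contains w then (s, some w, p, b)
  else if pvPosWords.contains w then (s, c, pvPosWords.get? w, b)
  else if pvStopWords.contains w then (s, c, p, b)
  else (s, c, p, b ++ [w])

def parse_target_py (target : String) : Option String × Option String × Option String × Option String :=
  let words := PySem.Str.split₀ (PySem.Str.lower target)
  let r := words.foldl parseStepA (none, none, none, [])
  let base := if r.2.2.2 ≠ [] then PySem.Str.join " " r.2.2.2 else PySem.Str.lower target
  (some base, r.1, r.2.1, r.2.2.1)

-- ===== PORT B =====
def parse_target_py_alt (target : String) : Option String × Option String × Option String × Option String :=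
  let words := PySem.Str.split₀ (PySem.Str.lower target)
  let sizes := words.filterMap (fun w => pvSizeWords.get? w)
  let colors := words.filter (fun w => pvColorWords.contains w)
  let positions := words.filterMap (fun w => pvPosWords.get? w)
  let baseWords := words.filter (fun w =>
    !pvSizeWords.contains w && !pvColorWords.contains w &&
    !pvPosWords.contains w && !pvStopWords.contains w)
  let base := if baseWords ≠ [] then PySem.Str.join " " baseWords else PySem.Str.lower target
  (some base, sizes.getLast?, colors.getLast?, positions.getLast?)

-- ===== PRECONDITION & SPEC =====
def Spec_parse_target_py (target : String) (out : Option String × Option String × Option String × Option String) : Prop := out = parse_target_py_alt target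
instance (target : String) (out : Option String × Option String × Option String × Option String) : Decidable (Spec_parse_target_py target out) := by unfold Spec_parse_target_py; infer_instance

-- ===== CLAIM (what is proved, stated in full; the proofs are below) =====
def Claim_equal_parse_target_py : Prop := ∀ (target : String), Dom_parse_target_py target → Spec_parse_target_py target (parse_target_py target)

-- ===== LEMMAS AND PROOFS =====

-- words in the size table are in no other category
lemma size_mem (w : String) (h : pvSizeWords.contains w = true) :
    w ∈ (["biggest","largest","big","large","smallest","small","little","tiny"] : List String) := by
  rw [PySem.Dict.contains_eq_decide_mem_keys] at h
  simpa [pvSizeWords, PySem.Dict.keys] using of_decide_eq_true h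

lemma color_mem (w : String) (h : pvColorWords.contains w = true) : w ∈ pvColorWords := by
  simpa using h

lemma size_not_color (w : String) (h : pvSizeWords.contains w = true) :
    pvColorWords.contains w = false := by
  have := size_mem w h
  revert this
  have : ∀ x ∈ (["biggest","largest","big","large","smallest","small","little","tiny"] : List String),
      pvColorWords.contains x = false := by decide
  exact this w

lemma size_not_pos (w : String) (h : pvSizeWords.contains w = true) :
    pvPosWords.contains w = false := by
  have hm := size_mem w h
  have hall : ∀ x ∈ (["biggest","largest","big","large","smallest","small","little","tiny"] : List String),
      pvPosWords.contains x = false := by decide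
  exact hall w hm

lemma color_not_pos (w : String) (h : pvColorWords.contains w = true) :
    pvPosWords.contains w = false := by
  have hm := color_mem w h
  have hall : ∀ x ∈ pvColorWords, pvPosWords.contains x = false := by decide
  exact hall w hm

lemma or_getLast?_cons {α : Type} (a : α) (l : List α) (s : Option α) :
    ((a :: l).getLast?).or s = (l.getLast?).or (some a) := by
  cases l with
  | nil => simp
  | cons b t =>
    rw [List.getLast?_cons_cons]
    have h : (b :: t : List α).getLast?.isSome = true := by
      simp [List.getLast?_isSome]
    obtain ⟨v, hv⟩ := Option.isSome_iff_exists.mp h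
    simp [hv]

-- the loop of A computed from the four independent passes of B
lemma foldA_eq (ws : List String) (s c p : Option String) (b : List String) :
    ws.foldl parseStepA (s, c, p, b) =
      ( ((ws.filterMap (fun w => pvSizeWords.get? w)).getLast?).or s,
        ((ws.filter (fun w => pvColorWords.contains w)).getLast?).or c,
        ((ws.filterMap (fun w => pvPosWords.get? w)).getLast?).or p,
        b ++ ws.filter (fun w =>
          !pvSizeWords.contains w && !pvColorWords.contains w &&
          !pvPosWords.contains w && !pvStopWords.contains w) ) := by
  induction ws generalizing s c p b with
  | nil => simp
  | cons w ws ih =>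
    simp only [List.foldl_cons, parseStepA, List.filterMap_cons, List.filter_cons]
    by_cases h1 : pvSizeWords.contains w = true
    · have hc := size_not_color w h1
      have hp := size_not_pos w h1
      have hg : (pvSizeWords.get? w).isSome = true := by
        rw [← PySem.Dict.contains_eq_isSome_get?]; exact h1
      obtain ⟨v, hv⟩ := Option.isSome_iff_exists.mp hg
      have hpn : pvPosWords.get? w = none := by
        have hh := PySem.Dict.contains_eq_isSome_get? (d := pvPosWords) (k := w)
        rw [hp] at hh; exact Option.not_isSome_iff_eq_none.mp (by simp [← hh])
      rw [if_pos h1, ih, hv]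
      have hc' : w ∉ pvColorWords := by simpa using hc
      simp [hc', h1, hp, hpn, or_getLast?_cons]
    · rw [Bool.not_eq_true] at h1
      rw [if_neg (by simp [h1])]
      have hgnone : pvSizeWords.get? w = none := by
        have hh := PySem.Dict.contains_eq_isSome_get? (d := pvSizeWords) (k := w)
        rw [h1] at hh; exact Option.not_isSome_iff_eq_none.mp (by simp [← hh])
      by_cases h2 : pvColorWords.contains w = true
      · have hp := color_not_pos w h2
        have hpn : pvPosWords.get? w = none := by
          have hh := PySem.Dict.contains_eq_isSome_get? (d := pvPosWords) (k := w)
          rw [hp] at hh; exact Option.not_isSome_iff_eq_none.mp (by simp [← hh])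
        rw [if_pos h2, ih]
        have h2' : w ∈ pvColorWords := by simpa using h2
        simp [hgnone, h2', hp, hpn, or_getLast?_cons]
      · rw [Bool.not_eq_true] at h2
        rw [if_neg (by simpa using h2)]
        by_cases h3 : pvPosWords.contains w = true
        · have hg : (pvPosWords.get? w).isSome = true := by
            rw [← PySem.Dict.contains_eq_isSome_get?]; exact h3
          obtain ⟨v, hv⟩ := Option.isSome_iff_exists.mp hg
          rw [if_pos h3, ih, hv]
          have h2' : w ∉ pvColorWords := by simpa using h2
          simp [hgnone, h2', h3, or_getLast?_cons]
        · rw [Bool.not_eq_true] at h3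
          rw [if_neg (by simp [h3])]
          have hpnone : pvPosWords.get? w = none := by
            have hh := PySem.Dict.contains_eq_isSome_get? (d := pvPosWords) (k := w)
            rw [h3] at hh; exact Option.not_isSome_iff_eq_none.mp (by simp [← hh])
          by_cases h4 : pvStopWords.contains w = true
          · rw [if_pos h4, ih]
            have h2' : w ∉ pvColorWords := by simpa using h2
            have h4' : w ∈ pvStopWords := by simpa using h4
            simp [hgnone, hpnone, h2', h4']
          · rw [Bool.not_eq_true] at h4
            rw [if_neg (by simpa using h4)]
            rw [ih]
            have h2' : w ∉ pvColorWords := by simpa using h2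
            have h4' : w ∉ pvStopWords := by simpa using h4
            simp [hgnone, hpnone, h1, h2', h3, h4']

-- ===== VERDICT (by name: the statement is the Claim_ definition above) =====
theorem parse_target_py_spec : Claim_equal_parse_target_py := by
  intro target _
  unfold Spec_parse_target_py parse_target_py parse_target_py_alt
  simp only [foldA_eq]
  simp
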